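-- pv_equiv track=rewrite | github.com/VarunPius/PracticeProblems | Challenges/MicrosoftOA/MaxInserts2ObtainStringWithout3Consecutive_a/Solution.py | max_insert
-- ===== SOURCE A (Python) =====
-- def max_insert(s):
--     count = 0
--     res = 0
--
--     for c in s:
--         if c != 'a':
--             res += 2 - count
--             count = 0
--         else:
--             count += 1
--
--         if count == 3:
--             return -1
--     return res + 2 - count
-- ===== SOURCE B (Python) =====
-- def max_insert(s):
--     if 'aaa' in s:
--         return -1
--     return 2 * len(s) - 3 * s.count('a') + 2
-- ===== Notes on version B (the rewrite author's own statement) =====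
-- stated objective: simpler
-- what changed: Replaces A's per-character running-counter loop by a two-line closed form: a substring containment test decides the -1 case, otherwise an arithmetic formula of the length and the letter count gives the answer.
import Mathlib
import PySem

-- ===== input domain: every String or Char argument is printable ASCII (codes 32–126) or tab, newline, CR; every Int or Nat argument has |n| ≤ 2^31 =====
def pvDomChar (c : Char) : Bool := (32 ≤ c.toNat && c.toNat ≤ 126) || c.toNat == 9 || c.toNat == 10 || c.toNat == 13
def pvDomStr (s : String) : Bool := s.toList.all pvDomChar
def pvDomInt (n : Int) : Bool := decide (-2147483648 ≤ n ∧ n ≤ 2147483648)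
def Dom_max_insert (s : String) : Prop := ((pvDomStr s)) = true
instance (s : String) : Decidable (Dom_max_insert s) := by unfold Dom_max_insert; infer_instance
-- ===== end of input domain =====

-- B replaces A's running-counter loop by a closed form: a substring test for the -1 case, else an arithmetic formula of length and letter count (objective: simpler).

-- ===== PORT A =====
-- the for-loop of A with its state (count, res) and the early 'return -1'
def maxInsertLoopA : List Char → Int → Int → Int
  | [], count, res => res + 2 - count
  | c :: rest, count, res =>
    let st := if c ≠ 'a' then (0, res + 2 - count) else (count + 1, res)
    if st.1 = 3 then -1 else maxInsertLoopA rest st.1 st.2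

def max_insert (s : String) : Int := maxInsertLoopA s.toList 0 0

-- ===== PORT B =====
def max_insert_alt (s : String) : Int :=
  if PySem.Str.isIn "aaa" s then -1
  else 2 * (PySem.Str.len s : Int) - 3 * (PySem.Str.count s "a" : Int) + 2

-- ===== PRECONDITION & SPEC =====
def Spec_max_insert (s : String) (out : Int) : Prop := out = max_insert_alt s
instance (s : String) (out : Int) : Decidable (Spec_max_insert s out) := by unfold Spec_max_insert; infer_instance

-- ===== CLAIM (what is proved, stated in full; the proofs are below) =====
def Claim_equal_max_insert : Prop := ∀ (s : String), Dom_max_insert s → Spec_max_insert s (max_insert s)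

-- ===== LEMMAS AND PROOFS =====

-- s.count('a') counts the single character 'a'
theorem charsCountGo_single (sub : List Char) (h1 : sub = ['a']) :
    ∀ (fuel : Nat) (l : List Char), l.length ≤ fuel → ∀ acc : Nat,
      PySem.Chars.count.go sub fuel l acc = acc + l.count 'a' := by
  subst h1
  intro fuel
  induction fuel with
  | zero =>
    intro l hl acc
    have : l = [] := List.eq_nil_of_length_eq_zero (Nat.le_zero.mp hl)
    subst this
    simp [PySem.Chars.count.go]
  | succ n ih =>
    intro l hl acc
    cases l with
    | nil => simp [PySem.Chars.count.go]
    | cons x t =>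
      simp only [PySem.Chars.count.go]
      by_cases hx : x = 'a'
      · subst hx
        have hpre : List.isPrefixOf ['a'] ('a' :: t) = true := by
          simp [List.isPrefixOf]
        rw [if_pos hpre]
        have hd : List.drop (['a'] : List Char).length ('a' :: t) = t := rfl
        rw [hd]
        simp only [List.length_cons] at hl
        rw [ih t (by omega) (acc + 1)]
        simp
        omega
      · have hpre : List.isPrefixOf ['a'] (x :: t) = false := by
          simp [List.isPrefixOf, Ne.symm hx]
        rw [hpre]
        simp only [Bool.false_eq_true, if_false]
        rw [ih t (by simpa using Nat.le_of_succ_le_succ hl) acc]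
        simp [hx]

theorem count_single (l : List Char) : PySem.Chars.count l ['a'] = l.count 'a' := by
  simp only [PySem.Chars.count]
  rw [charsCountGo_single ['a'] rfl l.length l (le_refl _) 0]
  simp

-- dropping a non-'a' head cannot destroy or create an "aaa" occurrence
theorem infix_aaa_cons (x : Char) (t : List Char) (hx : x ≠ 'a') :
    (['a','a','a'] <:+: x :: t) ↔ ['a','a','a'] <:+: t := by
  rw [List.infix_cons_iff]
  constructor
  · rintro (hpre | h)
    · rcases List.cons_prefix_cons.mp hpre with ⟨hxa, _⟩
      exact absurd hxa.symm hx
    · exact h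
  · exact fun h => Or.inr h

theorem infix_aaa_a_cons (x : Char) (t : List Char) (hx : x ≠ 'a') :
    (['a','a','a'] <:+: 'a' :: x :: t) ↔ ['a','a','a'] <:+: t := by
  rw [List.infix_cons_iff]
  constructor
  · rintro (hpre | h)
    · rcases List.cons_prefix_cons.mp hpre with ⟨_, hpre2⟩
      rcases List.cons_prefix_cons.mp hpre2 with ⟨hxa, _⟩
      exact absurd hxa.symm hx
    · exact (infix_aaa_cons x t hx).mp h
  · intro h
    exact Or.inr ((infix_aaa_cons x t hx).mpr h)

theorem infix_aaa_aa_cons (x : Char) (t : List Char) (hx : x ≠ 'a') :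
    (['a','a','a'] <:+: 'a' :: 'a' :: x :: t) ↔ ['a','a','a'] <:+: t := by
  rw [List.infix_cons_iff]
  constructor
  · rintro (hpre | h)
    · rcases List.cons_prefix_cons.mp hpre with ⟨_, hpre2⟩
      rcases List.cons_prefix_cons.mp hpre2 with ⟨_, hpre3⟩
      rcases List.cons_prefix_cons.mp hpre3 with ⟨hxa, _⟩
      exact absurd hxa.symm hx
    · exact (infix_aaa_a_cons x t hx).mp h
  · intro h
    exact Or.inr ((infix_aaa_a_cons x t hx).mpr h)

theorem infix_aaa_rep_cons (c : Nat) (hc : c ≤ 2) (x : Char) (t : List Char) (hx : x ≠ 'a') :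
    (['a','a','a'] <:+: List.replicate c 'a' ++ x :: t) ↔ ['a','a','a'] <:+: t := by
  interval_cases c
  · simpa using infix_aaa_cons x t hx
  · simpa [List.replicate] using infix_aaa_a_cons x t hx
  · simpa [List.replicate] using infix_aaa_aa_cons x t hx

-- the loop invariant: with c trailing 'a's pending (c ≤ 2), the loop computes the closed form
theorem loopA_closed : ∀ (l : List Char) (c : Nat), c ≤ 2 → ∀ res : Int,
    maxInsertLoopA l (c : Int) res =
      if ['a','a','a'] <:+: List.replicate c 'a' ++ l then -1
      else res + 2 * l.length - 3 * (l.count 'a' : Int) + 2 - c := by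
  intro l
  induction l with
  | nil =>
    intro c hc res
    have hni : ¬ (['a','a','a'] <:+: List.replicate c 'a' ++ ([] : List Char)) := by
      intro h
      have hle := h.length_le
      simp only [List.length_append, List.length_replicate, List.length_cons,
        List.length_nil] at hle
      omega
    rw [if_neg hni]
    simp only [maxInsertLoopA, List.length_nil, List.count_nil, Nat.cast_zero]
    ring
  | cons x t ih =>
    intro c hc res
    by_cases hx : x = 'a'
    · subst hx
      simp only [maxInsertLoopA, ne_eq, not_true_eq_false, if_false]
      by_cases hc2 : c = 2
      · subst hc2
        have hinf : ['a','a','a'] <:+: List.replicate 2 'a' ++ 'a' :: t := by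
          refine ⟨[], t, ?_⟩
          simp [List.replicate]
        rw [if_pos (show ((2 : Nat) : Int) + 1 = 3 by norm_num), if_pos hinf]
      · have hne : ¬ ((c : Int) + 1 = 3) := by omega
        rw [if_neg hne]
        have hcast : (c : Int) + 1 = ((c + 1 : Nat) : Int) := by push_cast; ring
        rw [hcast, ih (c + 1) (by omega) res]
        have hlist : List.replicate (c + 1) 'a' ++ t = List.replicate c 'a' ++ 'a' :: t := by
          rw [List.replicate_succ']
          simp
        rw [hlist]
        split_ifs with h
        · rfl
        · simp only [List.count_cons, List.length_cons, beq_iff_eq]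
          push_cast
          ring
    · simp only [maxInsertLoopA, ne_eq, hx, not_false_eq_true, if_true]
      rw [if_neg (show ¬ (0 : Int) = 3 by norm_num)]
      have hih := ih 0 (by omega) (res + 2 - (c : Int))
      simp only [Nat.cast_zero, List.replicate_zero, List.nil_append] at hih
      rw [hih]
      simp only [infix_aaa_rep_cons c hc x t hx]
      split_ifs with h
      · rfl
      · simp only [List.count_cons, List.length_cons, beq_iff_eq, hx, if_false]
        push_cast
        ring

-- ===== VERDICT (by name: the statement is the Claim_ definition above) =====
theorem max_insert_spec : Claim_equal_max_insert := by
  intro s _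
  unfold Spec_max_insert max_insert max_insert_alt
  have h := loopA_closed s.toList 0 (by omega) 0
  simp only [List.replicate_zero, List.nil_append, Nat.cast_zero] at h
  rw [h]
  by_cases hin : ['a','a','a'] <:+: s.toList
  · rw [if_pos hin]
    have : PySem.Str.isIn "aaa" s = true := by
      rw [PySem.Str.isIn_iff_infix]
      simpa using hin
    rw [if_pos this]
  · rw [if_neg hin]
    have : ¬ PySem.Str.isIn "aaa" s = true := by
      rw [PySem.Str.isIn_iff_infix]
      simpa using hin
    simp only [this, if_false, Bool.false_eq_true]
    rw [PySem.Str.count]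
    have : ("a" : String).toList = ['a'] := rfl
    rw [this, count_single]
    simp [PySem.Str.len]
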